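-- pv_equiv track=rewrite | github.com/anonconda/TranSuite | lib/findlorf/findlorf_tools.py | convert_to_relative_position
-- ===== SOURCE A (Python) =====
-- def convert_to_relative_position(exon_list):
--
--     result, start = [], 0
--     for exon in exon_list:
--         exon_len = exon[-1]-exon[0]
--
--         # Using a list-index starting with 1
--         start = start+1
--         end = start+exon_len
--
--         result.append([start, end])
--         start = end
--
--     # Since list-index use a +1 coordinate system it is necessary to add +1 position at the end
--     result[-1][-1] += 1
--
--     return result
-- ===== SOURCE B (Python) =====
-- def convert_to_relative_position(exon_list):
--     # Pass 1: cumulative ends (prefix sums of exon lengths in 1-based coordinates)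
--     ends, total = [], 0
--     for exon in exon_list:
--         total += exon[-1] - exon[0] + 1
--         ends.append(total)
--     # Pass 2: each start is the previous end + 1
--     result = [[prev + 1, end] for prev, end in zip([0] + ends, ends)]
--     result[-1][-1] += 1
--     return result
-- ===== Notes on version B (the rewrite author's own statement) =====
-- stated objective: alternative
-- what changed: Replaces A's single loop carrying a running start/end pair and in-loop pair construction by a two-pass prefix-sum decomposition: pass 1 accumulates cumulative exon ends, pass 2 zips each end with its predecessor to build the [start, end] pairs.
import Mathlib
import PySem

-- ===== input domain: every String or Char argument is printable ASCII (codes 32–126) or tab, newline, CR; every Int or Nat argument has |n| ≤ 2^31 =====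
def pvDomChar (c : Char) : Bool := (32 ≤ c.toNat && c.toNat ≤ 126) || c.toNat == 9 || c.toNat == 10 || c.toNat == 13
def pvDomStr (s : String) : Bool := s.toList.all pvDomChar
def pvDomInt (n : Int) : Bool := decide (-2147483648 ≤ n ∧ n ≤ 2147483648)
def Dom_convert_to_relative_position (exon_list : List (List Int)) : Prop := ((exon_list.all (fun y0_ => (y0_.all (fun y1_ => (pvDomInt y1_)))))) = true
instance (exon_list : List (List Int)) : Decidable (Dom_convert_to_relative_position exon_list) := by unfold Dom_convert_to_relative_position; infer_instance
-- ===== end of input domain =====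

-- B replaces A's running start/end loop by a prefix-sum pass plus a zip/map pass (same cost, different decomposition); equivalence is on the return value.

-- ===== PORT A =====
-- per-exon length exon[-1] - exon[0]; getD 0 is only reached on an empty exon, which Pre_ excludes (Python raises IndexError there)
def pvExonLen (exon : List Int) : Int :=
  (PySem.List.pyGet? exon (-1)).getD 0 - (PySem.List.pyGet? exon 0).getD 0

-- result[-1][-1] += 1 on a nonempty list of nonempty pairs (Pre_ guarantees that); shared mutation step of both Pythons
def pvBumpLast (result : List (List Int)) : List (List Int) :=
  result.dropLast ++ [(result.getLastD []).dropLast ++ [(result.getLastD []).getLastD 0 + 1]]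

def convert_to_relative_position (exon_list : List (List Int)) : List (List Int) :=
  let p := exon_list.foldl (fun (acc : List (List Int) × Int) exon =>
      let exon_len := pvExonLen exon
      let start := acc.2 + 1
      let e := start + exon_len
      (acc.1 ++ [[start, e]], e)) ([], 0)
  pvBumpLast p.1

-- ===== PORT B =====
def convert_to_relative_position_alt (exon_list : List (List Int)) : List (List Int) :=
  let ends := (exon_list.foldl (fun (acc : List Int × Int) exon =>
      let total := acc.2 + (pvExonLen exon + 1)
      (acc.1 ++ [total], total)) ([], 0)).1
  let result := (List.zip (0 :: ends) ends).map (fun pe => [pe.1 + 1, pe.2])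
  pvBumpLast result

-- ===== PRECONDITION & SPEC =====
-- Pre_ excludes exactly the inputs where Python A raises IndexError: the empty exon list (result[-1]) and any empty exon (exon[-1]); B raises there too.
def Pre_convert_to_relative_position (exon_list : List (List Int)) : Prop :=
  exon_list ≠ [] ∧ ∀ exon ∈ exon_list, exon ≠ []
instance (exon_list : List (List Int)) : Decidable (Pre_convert_to_relative_position exon_list) := by unfold Pre_convert_to_relative_position; infer_instance

def pvWitness_convert_to_relative_position : List (List Int) := [[1, 5], [10, 12]]

def Spec_convert_to_relative_position (exon_list : List (List Int)) (out : List (List Int)) : Prop := out = convert_to_relative_position_alt exon_list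
instance (exon_list : List (List Int)) (out : List (List Int)) : Decidable (Spec_convert_to_relative_position exon_list out) := by unfold Spec_convert_to_relative_position; infer_instance

-- ===== CLAIM (what is proved, stated in full; the proofs are below) =====
def Claim_equal_convert_to_relative_position : Prop := ∀ (exon_list : List (List Int)), Dom_convert_to_relative_position exon_list → Pre_convert_to_relative_position exon_list → Spec_convert_to_relative_position exon_list (convert_to_relative_position exon_list)

-- ===== LEMMAS AND PROOFS =====

-- the list of cumulative ends B computes, as a structural recursion from a given running total
def pvEnds (l : List (List Int)) (s : Int) : List Int :=
  match l with
  | [] => []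
  | e :: t => (s + (pvExonLen e + 1)) :: pvEnds t (s + (pvExonLen e + 1))

lemma pvEnds_fold (l : List (List Int)) (acc : List Int) (s : Int) :
    (l.foldl (fun (acc : List Int × Int) exon =>
      let total := acc.2 + (pvExonLen exon + 1)
      (acc.1 ++ [total], total)) (acc, s)).1 = acc ++ pvEnds l s := by
  induction l generalizing acc s with
  | nil => simp [pvEnds]
  | cons e t ih => simp [pvEnds, ih]

lemma pvFoldA_eq (l : List (List Int)) (acc : List (List Int)) (s : Int) :
    (l.foldl (fun (acc : List (List Int) × Int) exon =>
      let exon_len := pvExonLen exon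
      let start := acc.2 + 1
      let e := start + exon_len
      (acc.1 ++ [[start, e]], e)) (acc, s)).1
    = acc ++ (List.zip (s :: pvEnds l s) (pvEnds l s)).map (fun pe => [pe.1 + 1, pe.2]) := by
  induction l generalizing acc s with
  | nil => simp [pvEnds]
  | cons e t ih =>
      have h : s + 1 + pvExonLen e = s + (pvExonLen e + 1) := by ring
      simp only [List.foldl_cons, pvEnds, ih, h]
      simp

-- ===== VERDICT (by name: the statement is the Claim_ definition above) =====
theorem convert_to_relative_position_spec : Claim_equal_convert_to_relative_position := by
  intro exon_list _ _
  show convert_to_relative_position exon_list = convert_to_relative_position_alt exon_list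
  simp only [convert_to_relative_position, convert_to_relative_position_alt,
    pvFoldA_eq, pvEnds_fold, List.nil_append]
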